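-- pv_equiv track=rewrite | github.com/DL4Jets/DeepJetCore | modules/testing.py | createColours
-- ===== SOURCE A (Python) =====
-- colormap=['red'
--  , 'blue'
--  , 'darkgreen'
--  , 'purple'
--  , 'darkred'
--  , 'darkblue'
--  , 'green'
--  , 'darkpurple'
--  , 'gray']
--
-- dashedcolormap=['red','red,dashed'
--  , 'blue','blue,dashed'
--  , 'darkgreen','darkgreen,dashed'
--  , 'purple','purple,dashed'
--  , 'darkred','darkred,dashed'
--  , 'darkblue','darkblue,dashed'
--  , 'green','green,dashed'
--  , 'darkpurple','darkpurple,dashed'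
--  , 'gray','gray,dashed']
--
-- def createColours(colors_list,name_list,nnames=None,extralegend=[]):
--     if not nnames:
--         nnames=len(name_list)
--     if 'auto' in colors_list:
--         newcolors=[]
--         usemap=colormap
--         if 'dashed' in colors_list and not len(extralegend):
--             usemap=dashedcolormap
--         if len(name_list) > len(usemap):
--             raise Exception('colors_list=auto: too many entries, color map too small')
--         stylecounter=0
--         colorcounter=0
--         for i in range(len(name_list)):
--             if len(extralegend):
--                 newcolors.append(usemap[colorcounter] + ','+extralegend[stylecounter].split('?')[0])
--             else:
--                 newcolors.append(usemap[colorcounter])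
--             colorcounter=colorcounter+1
--             if colorcounter == nnames:
--                 colorcounter=0
--                 stylecounter=stylecounter+1
--
--         colors_list=newcolors
--     return   colors_list
-- ===== SOURCE B (Python) =====
-- colormap=['red'
--  , 'blue'
--  , 'darkgreen'
--  , 'purple'
--  , 'darkred'
--  , 'darkblue'
--  , 'green'
--  , 'darkpurple'
--  , 'gray']
--
-- dashedcolormap=['red','red,dashed'
--  , 'blue','blue,dashed'
--  , 'darkgreen','darkgreen,dashed'
--  , 'purple','purple,dashed'
--  , 'darkred','darkred,dashed'
--  , 'darkblue','darkblue,dashed'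
--  , 'green','green,dashed'
--  , 'darkpurple','darkpurple,dashed'
--  , 'gray','gray,dashed']
--
-- def createColours(colors_list, name_list, nnames=None, extralegend=[]):
--     if 'auto' not in colors_list:
--         return colors_list
--     usemap = dashedcolormap if ('dashed' in colors_list and not extralegend) else colormap
--     if len(name_list) > len(usemap):
--         raise Exception('colors_list=auto: too many entries, color map too small')
--     total = len(name_list)
--     n = nnames if (nnames is not None and nnames > 0) else total
--     # build block-wise: style j covers a prefix slice of usemap of size min(n, remaining)
--     newcolors = []
--     remaining = total
--     style = 0
--     while remaining > 0:
--         chunk = min(n, remaining)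
--         block = usemap[:chunk]
--         if extralegend:
--             suffix = ',' + extralegend[style].split('?')[0]
--             block = [c + suffix for c in block]
--         newcolors.extend(block)
--         remaining -= chunk
--         style += 1
--     return newcolors
-- ===== Notes on version B (the rewrite author's own statement) =====
-- stated objective: alternative
-- what changed: Replaces A's per-element loop with colorcounter/stylecounter state by a block-wise construction: a while loop that, per legend style, slices a prefix of the color map (usemap[:min(n,remaining)]), appends the style suffix to the whole block at once, and extends the output block by block.
import Mathlib
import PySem

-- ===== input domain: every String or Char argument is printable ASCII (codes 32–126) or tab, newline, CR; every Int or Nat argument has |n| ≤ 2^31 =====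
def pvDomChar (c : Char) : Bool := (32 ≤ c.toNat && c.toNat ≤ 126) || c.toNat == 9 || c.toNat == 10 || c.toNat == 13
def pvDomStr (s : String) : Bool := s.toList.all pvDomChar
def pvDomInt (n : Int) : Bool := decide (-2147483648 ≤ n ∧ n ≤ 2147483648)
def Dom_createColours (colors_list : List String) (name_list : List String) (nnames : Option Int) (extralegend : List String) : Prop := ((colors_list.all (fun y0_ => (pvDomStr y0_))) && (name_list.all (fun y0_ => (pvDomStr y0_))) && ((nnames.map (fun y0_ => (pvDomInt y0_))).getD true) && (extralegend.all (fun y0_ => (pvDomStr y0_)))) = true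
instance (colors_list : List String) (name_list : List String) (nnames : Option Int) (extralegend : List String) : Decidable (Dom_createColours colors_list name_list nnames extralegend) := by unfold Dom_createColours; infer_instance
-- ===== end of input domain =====

-- B builds the result block-wise (one prefix slice of the color map per legend style, suffix
-- appended to the whole block) instead of A's per-element counter loop (objective: alternative).

def colormap : List String :=
  ["red", "blue", "darkgreen", "purple", "darkred", "darkblue", "green", "darkpurple", "gray"]

def dashedcolormap : List String :=
  ["red", "red,dashed", "blue", "blue,dashed", "darkgreen", "darkgreen,dashed",
   "purple", "purple,dashed", "darkred", "darkred,dashed", "darkblue", "darkblue,dashed",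
   "green", "green,dashed", "darkpurple", "darkpurple,dashed", "gray", "gray,dashed"]

-- ===== PORT A =====
-- the two 'raise' points of the Python (the explicit Exception and the IndexError from
-- extralegend[stylecounter]) are excluded by Pre_createColours; the port returns [] / "" there
def createColours (colors_list : List String) (name_list : List String) (nnames : Option Int) (extralegend : List String) : List String :=
  let nn : Int := match nnames with
    | none => (name_list.length : Int)
    | some n => if n = 0 then (name_list.length : Int) else n
  if colors_list.contains "auto" then
    let usemap := if colors_list.contains "dashed" && extralegend.length == 0 then dashedcolormap else colormap
    if name_list.length > usemap.length then
      []  -- raise Exception(...) — outside Pre_createColours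
    else
      let res := (PySem.List.pyRange 0 (name_list.length : Int) 1).foldl
        (fun (st : List String × Int × Int) (_i : Int) =>
          let newcolors := st.1 ++
            [if extralegend.length ≠ 0 then
              PySem.List.pyGetD usemap st.2.1 "" ++ "," ++
                PySem.List.pyGetD ((PySem.Str.split? (PySem.List.pyGetD extralegend st.2.2 "") "?").getD []) 0 ""
            else
              PySem.List.pyGetD usemap st.2.1 ""]
          let colorcounter := st.2.1 + 1
          if colorcounter = nn then (newcolors, 0, st.2.2 + 1) else (newcolors, colorcounter, st.2.2))
        ([], 0, 0)
      res.1
  else colors_list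

-- ===== PORT B =====
-- B's while loop: one iteration per style block; the 'n = 0' branch is a termination guard
-- the Python never reaches (the loop body only runs with remaining > 0, which forces n > 0)
def pvBlocks (usemap : List String) (extralegend : List String) (n : Nat) (remaining : Nat) (style : Nat) : List String :=
  if remaining = 0 then []
  else if n = 0 then []
  else
    let chunk := min n remaining
    let block := usemap.take chunk
    let block2 := if extralegend.isEmpty then block
      else block.map (fun c => c ++ "," ++
        PySem.List.pyGetD ((PySem.Str.split? (PySem.List.pyGetD extralegend (style : Int) "") "?").getD []) 0 "")
    block2 ++ pvBlocks usemap extralegend n (remaining - chunk) (style + 1)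
termination_by remaining
decreasing_by omega

def createColours_alt (colors_list : List String) (name_list : List String) (nnames : Option Int) (extralegend : List String) : List String :=
  if !(colors_list.contains "auto") then colors_list
  else
    let usemap := if colors_list.contains "dashed" && extralegend.isEmpty then dashedcolormap else colormap
    if name_list.length > usemap.length then
      []  -- raise Exception(...) — outside Pre_createColours
    else
      let total := name_list.length
      let n : Nat := match nnames with
        | some m => if 0 < m then m.toNat else total
        | none => total
      pvBlocks usemap extralegend n total 0

-- ===== PRECONDITION & SPEC =====
-- Pre_ excludes exactly the inputs on which the Python A raises: the explicit Exception when
-- name_list is longer than the chosen color map, and the IndexError when, for a given positive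
-- nnames, the style counter (len(name_list)-1) // nnames reaches past the end of extralegend.
def Pre_createColours (colors_list : List String) (name_list : List String) (nnames : Option Int) (extralegend : List String) : Prop :=
  "auto" ∈ colors_list →
    (name_list.length ≤ (if "dashed" ∈ colors_list ∧ extralegend = [] then 18 else 9) ∧
     (extralegend ≠ [] → 0 < nnames.getD 0 →
       (name_list.length - 1) / (nnames.getD 0).toNat < extralegend.length))
instance (colors_list : List String) (name_list : List String) (nnames : Option Int) (extralegend : List String) : Decidable (Pre_createColours colors_list name_list nnames extralegend) := by unfold Pre_createColours; infer_instance

def pvWitness_createColours : List String × List String × Option Int × List String :=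
  (["auto"], ["a", "b"], some 1, ["x?y", "z"])

def Spec_createColours (colors_list : List String) (name_list : List String) (nnames : Option Int) (extralegend : List String) (out : List String) : Prop := out = createColours_alt colors_list name_list nnames extralegend
instance (colors_list : List String) (name_list : List String) (nnames : Option Int) (extralegend : List String) (out : List String) : Decidable (Spec_createColours colors_list name_list nnames extralegend out) := by unfold Spec_createColours; infer_instance

-- ===== CLAIM (what is proved, stated in full; the proofs are below) =====
def Claim_equal_createColours : Prop := ∀ (colors_list : List String) (name_list : List String) (nnames : Option Int) (extralegend : List String), Dom_createColours colors_list name_list nnames extralegend → Pre_createColours colors_list name_list nnames extralegend → Spec_createColours colors_list name_list nnames extralegend (createColours colors_list name_list nnames extralegend)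

-- ===== LEMMAS AND PROOFS =====

-- A's loop, abstracted over the appended item: with a positive modulus N the counters after k
-- iterations are k % N and k / N, and the accumulated list is the closed-form map.
theorem loopA_pos (item : Int → Int → String) (N : Nat) (h0 : 0 < N) (k : Nat) :
    (PySem.List.pyRange 0 (k : Int) 1).foldl
      (fun (st : List String × Int × Int) (_i : Int) =>
        let newcolors := st.1 ++ [item st.2.1 st.2.2]
        let colorcounter := st.2.1 + 1
        if colorcounter = (N : Int) then (newcolors, 0, st.2.2 + 1)
        else (newcolors, colorcounter, st.2.2))
      ([], 0, 0)
    = ((List.range k).map (fun i => item ((i % N : Nat) : Int) ((i / N : Nat) : Int)),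
       ((k % N : Nat) : Int), ((k / N : Nat) : Int)) := by
  induction k with
  | zero => simp [PySem.List.pyRange_one_eq_nil, Nat.zero_mod, Nat.zero_div]
  | succ k ih =>
    have hcast : ((k + 1 : Nat) : Int) = (k : Int) + 1 := by push_cast; ring
    rw [hcast, PySem.List.pyRange_one_succ_right (by positivity), List.foldl_append, ih]
    simp only [List.foldl_cons, List.foldl_nil, List.range_succ, List.map_append, List.map_cons,
      List.map_nil]
    by_cases h : k % N + 1 = N
    · have hk1 : k + 1 = N * (k / N + 1) := by
        rw [Nat.mul_add, Nat.mul_one]; have hdm := Nat.div_add_mod k N; omega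
      have hm : (k + 1) % N = 0 := by rw [hk1]; exact Nat.mul_mod_right N _
      have hd : (k + 1) / N = k / N + 1 := by rw [hk1]; exact Nat.mul_div_cancel_left _ h0
      simp [hm, hd]
      exact_mod_cast h
    · have hlt : k % N + 1 < N := by have := Nat.mod_lt k h0; omega
      have hk1 : k + 1 = N * (k / N) + (k % N + 1) := by
        have hdm := Nat.div_add_mod k N; omega
      have hm : (k + 1) % N = k % N + 1 := by
        rw [hk1, Nat.mul_add_mod]; exact Nat.mod_eq_of_lt hlt
      have hd : (k + 1) / N = k / N := by
        rw [hk1, Nat.mul_add_div h0]; simp [Nat.div_eq_of_lt hlt]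
      simp [hm, hd]
      exact_mod_cast h

-- A's loop with a negative modulus: the reset branch never fires, the counters are i and 0.
theorem loopA_neg (item : Int → Int → String) (nn : Int) (hn : nn < 0) (k : Nat) :
    (PySem.List.pyRange 0 (k : Int) 1).foldl
      (fun (st : List String × Int × Int) (_i : Int) =>
        let newcolors := st.1 ++ [item st.2.1 st.2.2]
        let colorcounter := st.2.1 + 1
        if colorcounter = nn then (newcolors, 0, st.2.2 + 1)
        else (newcolors, colorcounter, st.2.2))
      ([], 0, 0)
    = ((List.range k).map (fun (i : Nat) => item (i : Int) 0), (k : Int), 0) := by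
  induction k with
  | zero => simp [PySem.List.pyRange_one_eq_nil]
  | succ k ih =>
    have hcast : ((k + 1 : Nat) : Int) = (k : Int) + 1 := by push_cast; ring
    rw [hcast, PySem.List.pyRange_one_succ_right (by positivity), List.foldl_append, ih]
    have hne : ¬ ((k : Int) + 1 = nn) := by omega
    simp [List.range_succ, hne]

-- a prefix of a list, written as indexed lookups
theorem take_eq_map_range (xs : List String) (c : Nat) (h : c ≤ xs.length) :
    xs.take c = (List.range c).map (fun i => xs.getD i "") := by
  apply List.ext_getElem
  · simp [h]
  · intro i h1 h2
    simp only [List.length_take] at h1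
    have hi : i < c := by omega
    have hix : i < xs.length := by omega
    simp [List.getElem_take, List.getD, List.getElem?_eq_getElem hix]

-- B's block loop, in closed form: element i of the output is built from color index i % n
-- and style index style + i / n  (needs n > 0 and remaining within the color map)
set_option maxHeartbeats 800000 in
theorem blocks_closed (usemap : List String) (extralegend : List String) (n : Nat) (hn : 0 < n) :
    ∀ (remaining : Nat), remaining ≤ usemap.length → ∀ (style : Nat),
    pvBlocks usemap extralegend n remaining style
    = (List.range remaining).map (fun i =>
        if extralegend.isEmpty then usemap.getD (i % n) ""
        else usemap.getD (i % n) "" ++ "," ++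
          PySem.List.pyGetD ((PySem.Str.split? (PySem.List.pyGetD extralegend ((style + i / n : Nat) : Int) "") "?").getD []) 0 "") := by
  intro remaining
  induction remaining using Nat.strong_induction_on with
  | _ remaining ih =>
    intro hlen style
    rw [pvBlocks]
    by_cases hr : remaining = 0
    · simp [hr]
    · simp only [if_neg hr, if_neg (Nat.pos_iff_ne_zero.mp hn)]
      set chunk := min n remaining with hchunk
      have hc1 : 0 < chunk := by omega
      have hcr : chunk ≤ remaining := by omega
      have hcu : chunk ≤ usemap.length := by omega
      have hrec := ih (remaining - chunk) (by omega) (by omega) (style + 1)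
      rw [hrec, take_eq_map_range usemap chunk hcu]
      have hsplit : List.range remaining = List.range chunk ++ (List.range (remaining - chunk)).map (fun i => chunk + i) := by
        conv_lhs => rw [show remaining = chunk + (remaining - chunk) by omega]
        rw [List.range_add]
      rw [hsplit, List.map_append, List.map_map]
      refine congrArg₂ (· ++ ·) ?_ ?_
      · -- first block: indices i < chunk ≤ n, so i % n = i and i / n = 0
        by_cases he : extralegend.isEmpty
        · simp only [he, if_true]
          refine List.map_congr_left ?_
          intro i hi
          rw [List.mem_range] at hi
          have : i < n := by omega
          rw [Nat.mod_eq_of_lt this]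
        · simp only [he]
          refine List.map_congr_left ?_
          intro i hi
          rw [List.mem_range] at hi
          have hin : i < n := by omega
          simp [Nat.mod_eq_of_lt hin, Nat.div_eq_of_lt hin]
      · -- remaining blocks: chunk = n here (otherwise remaining - chunk = 0 and both sides are []),
        -- and (n + i) % n = i % n, (n + i) / n = i / n + 1
        rw [List.map_map]
        by_cases hcn : chunk = n
        · refine List.map_congr_left ?_
          intro i hi
          simp only [Function.comp_apply]
          rw [hcn, Nat.add_mod_left, Nat.add_div_left i hn]
          have hst : style + (i / n + 1) = style + 1 + i / n := by omega
          rw [hst]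
        · have h0 : remaining - chunk = 0 := by omega
          simp [h0]

-- the shape of A's appended item, relative to B's closed form (used to instantiate the cores)
def ItemFits (usemap : List String) (extralegend : List String) (item : Int → Int → String) : Prop :=
  ∀ (cc : Nat) (sc : Int), item (cc : Int) sc =
    if extralegend.isEmpty then usemap.getD cc ""
    else usemap.getD cc "" ++ "," ++
      PySem.List.pyGetD ((PySem.Str.split? (PySem.List.pyGetD extralegend sc "") "?").getD []) 0 ""

-- A's loop with positive modulus N equals B's block build with block size N
theorem core_pos (usemap : List String) (extralegend : List String) (item : Int → Int → String)
    (N L : Nat) (h0 : 0 < N) (hL : L ≤ usemap.length) (hitem : ItemFits usemap extralegend item) :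
    ((PySem.List.pyRange 0 (L : Int) 1).foldl
      (fun (st : List String × Int × Int) (_i : Int) =>
        let newcolors := st.1 ++ [item st.2.1 st.2.2]
        let colorcounter := st.2.1 + 1
        if colorcounter = (N : Int) then (newcolors, 0, st.2.2 + 1)
        else (newcolors, colorcounter, st.2.2))
      ([], 0, 0)).1
    = pvBlocks usemap extralegend N L 0 := by
  rw [loopA_pos item N h0 L, blocks_closed usemap extralegend N h0 L hL 0]
  refine List.map_congr_left ?_
  intro i _
  rw [hitem (i % N) ((i / N : Nat) : Int)]
  simp

-- A's loop with negative modulus never resets: one single block of size L on B's side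
theorem core_neg (usemap : List String) (extralegend : List String) (item : Int → Int → String)
    (nn : Int) (hn : nn < 0) (L : Nat) (hLpos : 0 < L) (hL : L ≤ usemap.length)
    (hitem : ItemFits usemap extralegend item) :
    ((PySem.List.pyRange 0 (L : Int) 1).foldl
      (fun (st : List String × Int × Int) (_i : Int) =>
        let newcolors := st.1 ++ [item st.2.1 st.2.2]
        let colorcounter := st.2.1 + 1
        if colorcounter = nn then (newcolors, 0, st.2.2 + 1)
        else (newcolors, colorcounter, st.2.2))
      ([], 0, 0)).1
    = pvBlocks usemap extralegend L L 0 := by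
  rw [loopA_neg item nn hn L, blocks_closed usemap extralegend L hLpos L hL 0]
  refine List.map_congr_left ?_
  intro i hi
  rw [List.mem_range] at hi
  rw [hitem i (0 : Int)]
  simp [Nat.mod_eq_of_lt hi, Nat.div_eq_of_lt hi]

-- both effective moduli (A's nnames-default and B's normalisation) give the same result
theorem core_all (usemap : List String) (extralegend : List String) (item : Int → Int → String)
    (nnames : Option Int) (L : Nat) (hL : L ≤ usemap.length)
    (hitem : ItemFits usemap extralegend item) :
    ((PySem.List.pyRange 0 (L : Int) 1).foldl
      (fun (st : List String × Int × Int) (_i : Int) =>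
        if st.2.1 + 1 =
            (match nnames with
             | none => (L : Int)
             | some n => if n = 0 then (L : Int) else n) then
          (st.1 ++ [item st.2.1 st.2.2], 0, st.2.2 + 1)
        else
          (st.1 ++ [item st.2.1 st.2.2], st.2.1 + 1, st.2.2))
      ([], 0, 0)).1
    = pvBlocks usemap extralegend
        (match nnames with
         | some m => if 0 < m then m.toNat else L
         | none => L) L 0 := by
  by_cases hL0 : L = 0
  · subst hL0
    rw [pvBlocks]
    simp [PySem.List.pyRange_one_eq_nil]
  · have hLpos : 0 < L := Nat.pos_of_ne_zero hL0
    match nnames with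
    | none => exact core_pos usemap extralegend item L L hLpos hL hitem
    | some m =>
      by_cases hm : m = 0
      · subst hm
        simp only [if_neg (lt_irrefl (0 : Int))]
        exact core_pos usemap extralegend item L L hLpos hL hitem
      · by_cases hmpos : 0 < m
        · simp only [if_neg hm, if_pos hmpos]
          rw [show m = ((m.toNat : Nat) : Int) from (Int.toNat_of_nonneg hmpos.le).symm]
          exact core_pos usemap extralegend item m.toNat L (by omega) hL hitem
        · simp only [if_neg hm, if_neg hmpos]
          exact core_neg usemap extralegend item m (by omega) L hLpos hL hitem

-- ===== VERDICT (by name: the statement is the Claim_ definition above) =====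
theorem createColours_spec : Claim_equal_createColours := by
  intro colors_list name_list nnames extralegend _hdom _hpre
  unfold Spec_createColours createColours createColours_alt
  by_cases hauto : colors_list.contains "auto"
  · rw [hauto]
    simp only [Bool.not_true, if_true, Bool.false_eq_true, if_false]
    by_cases hel : extralegend = []
    · subst hel
      simp only [List.length_nil, List.isEmpty_nil, beq_self_eq_true, Bool.and_true, ne_eq,
        not_true_eq_false, if_false]
      by_cases hC : name_list.length > (if colors_list.contains "dashed" = true then dashedcolormap else colormap).length
      · simp only [if_pos hC]
      · simp only [if_neg hC]
        exact core_all
          (if colors_list.contains "dashed" = true then dashedcolormap else colormap) []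
          (fun cc _sc => PySem.List.pyGetD (if colors_list.contains "dashed" = true then dashedcolormap else colormap) cc "")
          nnames name_list.length (by omega)
          (by intro cc sc; simp)
    · have h0 : extralegend.length ≠ 0 := by simpa [List.length_eq_zero_iff] using hel
      have hie : extralegend.isEmpty = false := by simp [hel]
      have hbe : (extralegend.length == 0) = false := by simpa using h0
      simp only [hie, hbe, Bool.and_false, if_false, if_true, ne_eq, h0,
        not_false_eq_true, Bool.false_eq_true]
      by_cases hC : name_list.length > colormap.length
      · simp only [if_pos hC]
      · simp only [if_neg hC]
        exact core_all colormap extralegend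
          (fun cc sc => PySem.List.pyGetD colormap cc "" ++ "," ++
            PySem.List.pyGetD ((PySem.Str.split? (PySem.List.pyGetD extralegend sc "") "?").getD []) 0 "")
          nnames name_list.length (by omega)
          (by intro cc sc; simp [hie])
  · simp only [Bool.not_eq_true] at hauto
    rw [hauto]
    simp
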